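-- pv_equiv track=rewrite | github.com/aga98/AdventOfCode2023 | Day 13 - Point of Incidence/common.py | check_reflections
-- ===== SOURCE A (Python) =====
-- def check_reflections(reflection_line: int, valley: list[str]) -> int:
--     """
--     Validate it is actually a reflection line
--     """
--     l = reflection_line
--     r = reflection_line + 1
--     matches = 0
--     while l >= 0 and r < len(valley):
--         if valley[l] != valley[r]:
--             return False
--         matches += 1
--         l -= 1
--         r += 1
--     return True
-- ===== SOURCE B (Python) =====
-- def check_reflections(reflection_line: int, valley: list[str]) -> int:
--     """
--     Validate it is actually a reflection line
--     """
--     width = min(reflection_line + 1, len(valley) - reflection_line - 1)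
--     if width <= 0:
--         return True
--     segment = valley[reflection_line + 1 - width : reflection_line + 1 + width]
--     return segment == segment[::-1]
-- ===== Notes on version B (the rewrite author's own statement) =====
-- stated objective: simpler
-- what changed: Replaces the two-pointer outward while-loop with a closed-form computation of the symmetric overlap window and a single palindrome test (segment == segment[::-1]).
import Mathlib
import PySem

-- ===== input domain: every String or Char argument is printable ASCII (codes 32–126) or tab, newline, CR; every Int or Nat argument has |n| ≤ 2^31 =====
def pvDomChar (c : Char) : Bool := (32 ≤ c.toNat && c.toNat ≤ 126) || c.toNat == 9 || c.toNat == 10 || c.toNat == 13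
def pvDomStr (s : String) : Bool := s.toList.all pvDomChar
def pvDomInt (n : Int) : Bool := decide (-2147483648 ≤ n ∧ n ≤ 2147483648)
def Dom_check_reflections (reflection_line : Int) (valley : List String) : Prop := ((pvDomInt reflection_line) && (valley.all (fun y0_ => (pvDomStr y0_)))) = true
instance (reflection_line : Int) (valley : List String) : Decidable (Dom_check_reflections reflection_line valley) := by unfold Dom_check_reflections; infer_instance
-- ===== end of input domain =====

-- B replaces A's two-pointer outward while-loop by building the symmetric overlap window
-- in closed form and testing it is a palindrome (objective: simpler).

-- ===== PORT A =====
-- the while loop: l walks down, r walks up, matches counts (dead for the result)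
def crLoop (valley : List String) (l r m_ : Int) : Bool :=
  if h : 0 ≤ l ∧ r < (valley.length : Int) then
    if PySem.List.pyGet? valley l ≠ PySem.List.pyGet? valley r then false
    else crLoop valley (l - 1) (r + 1) (m_ + 1)
  else true
termination_by (l + 1).toNat
decreasing_by omega

def check_reflections (reflection_line : Int) (valley : List String) : Bool :=
  crLoop valley reflection_line (reflection_line + 1) 0

-- ===== PORT B =====
def check_reflections_alt (reflection_line : Int) (valley : List String) : Bool :=
  let width := min (reflection_line + 1) ((valley.length : Int) - reflection_line - 1)
  if width ≤ 0 then true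
  else
    let segment := PySem.List.slice valley (some (reflection_line + 1 - width)) (some (reflection_line + 1 + width))
    -- segment[::-1] is segment.reverse (PySem.List.slice?_none_none_neg_one)
    segment == segment.reverse

-- ===== PRECONDITION & SPEC =====
def Spec_check_reflections (reflection_line : Int) (valley : List String) (out : Bool) : Prop := out = check_reflections_alt reflection_line valley
instance (reflection_line : Int) (valley : List String) (out : Bool) : Decidable (Spec_check_reflections reflection_line valley out) := by unfold Spec_check_reflections; infer_instance

-- ===== CLAIM (what is proved, stated in full; the proofs are below) =====
def Claim_equal_check_reflections : Prop := ∀ (reflection_line : Int) (valley : List String), Dom_check_reflections reflection_line valley → Spec_check_reflections reflection_line valley (check_reflections reflection_line valley)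

-- ===== LEMMAS AND PROOFS =====

-- A's loop returns true iff the W pairs it would visit all match
theorem crLoop_iff (valley : List String) : ∀ (W : Nat) (l r m : Int),
    min (l + 1) ((valley.length : Int) - r) = (W : Int) →
    (crLoop valley l r m = true ↔
      ∀ j : Nat, j < W → PySem.List.pyGet? valley (l - j) = PySem.List.pyGet? valley (r + j)) := by
  intro W
  induction W with
  | zero =>
    intro l r m h
    have hg : ¬ (0 ≤ l ∧ r < (valley.length : Int)) := by omega
    rw [crLoop, dif_neg hg]
    simp
  | succ W ih =>
    intro l r m h
    have hg : 0 ≤ l ∧ r < (valley.length : Int) := by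
      constructor <;> omega
    rw [crLoop, dif_pos hg]
    by_cases he : PySem.List.pyGet? valley l = PySem.List.pyGet? valley r
    · rw [if_neg (by simpa using he)]
      have hmin : min ((l - 1) + 1) ((valley.length : Int) - (r + 1)) = (W : Int) := by
        push_cast at h ⊢; omega
      rw [ih (l - 1) (r + 1) (m + 1) hmin]
      constructor
      · intro hW j hj
        cases j with
        | zero => simpa using he
        | succ j =>
          have := hW j (by omega)
          have e1 : l - ((j + 1 : Nat) : Int) = l - 1 - j := by push_cast; ring
          have e2 : r + ((j + 1 : Nat) : Int) = r + 1 + j := by push_cast; ring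
          rw [e1, e2]; exact this
      · intro hP j hj
        have := hP (j + 1) (by omega)
        have e1 : l - ((j + 1 : Nat) : Int) = l - 1 - j := by push_cast; ring
        have e2 : r + ((j + 1 : Nat) : Int) = r + 1 + j := by push_cast; ring
        rw [e1, e2] at this; exact this
    · rw [if_pos (by simpa using he)]
      simp only [Bool.false_eq_true, false_iff]
      push Not
      exact ⟨0, by omega, by simpa using he⟩

-- B's palindrome test on the window equals the same pairwise condition
theorem palin_iff (valley : List String) (rl w : Int)
    (hw : w = min (rl + 1) ((valley.length : Int) - rl - 1)) (hpos : 0 < w) :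
    ((PySem.List.slice valley (some (rl + 1 - w)) (some (rl + 1 + w)) ==
      (PySem.List.slice valley (some (rl + 1 - w)) (some (rl + 1 + w))).reverse) = true ↔
      ∀ j : Nat, j < w.toNat →
        PySem.List.pyGet? valley (rl - j) = PySem.List.pyGet? valley (rl + 1 + j)) := by
  have hrl : 0 ≤ rl := by omega
  have hwle : w ≤ rl + 1 := by omega
  have hub : rl + 1 + w ≤ (valley.length : Int) := by omega
  set K := rl.toNat with hK
  set W := w.toNat with hWdef
  have hWK : W ≤ K + 1 := by omega
  have hWpos : 0 < W := by omega
  have hWn : K + 1 + W ≤ valley.length := by omega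
  have hseg : PySem.List.slice valley (some (rl + 1 - w)) (some (rl + 1 + w)) =
      (valley.drop (K + 1 - W)).take (2 * W) := by
    rw [PySem.List.slice_of_nonneg valley (by omega) (by omega) (by omega) (by omega)]
    have e1 : (rl + 1 - w).toNat = K + 1 - W := by omega
    have e2 : (rl + 1 + w).toNat = K + 1 + W := by omega
    rw [e1, e2]
    congr 1
    omega
  rw [hseg, beq_iff_eq]
  set seg := (valley.drop (K + 1 - W)).take (2 * W) with hsegdef
  have hlen : seg.length = 2 * W := by
    simp [hsegdef]
    omega
  have hget : ∀ (i : Nat) (h : i < seg.length), seg[i] = valley[(K + 1 - W) + i]'(by omega) := by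
    intro i h
    simp only [hsegdef]
    rw [List.getElem_take, List.getElem_drop]
  have hpy : ∀ (j : Nat) (_hj : j < W),
      (PySem.List.pyGet? valley (rl - j) = PySem.List.pyGet? valley (rl + 1 + j) ↔
        valley[K - j]'(by omega) = valley[K + 1 + j]'(by omega)) := by
    intro j hj
    have e1 : rl - (j : Int) = ((K - j : Nat) : Int) := by omega
    have e2 : rl + 1 + (j : Int) = ((K + 1 + j : Nat) : Int) := by omega
    have hb1 : K - j < valley.length := by omega
    have hb2 : K + 1 + j < valley.length := by omega
    rw [e1, e2, PySem.List.pyGet?_natCast, PySem.List.pyGet?_natCast,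
        List.getElem?_eq_getElem hb1, List.getElem?_eq_getElem hb2]
    simp
  constructor
  · intro hpal j hj
    rw [hpy j hj]
    have h1 : W - 1 - j < seg.length := by omega
    have h2 : seg.length - 1 - (W - 1 - j) < seg.length := by omega
    have hq := congrArg (fun t : List String => t[W - 1 - j]?) hpal
    simp only [] at hq
    rw [List.getElem?_reverse h1] at hq
    rw [List.getElem?_eq_getElem h1, List.getElem?_eq_getElem h2, Option.some.injEq] at hq
    rw [hget _ h1, hget _ h2] at hq
    have e1 : K + 1 - W + (W - 1 - j) = K - j := by omega
    have e2 : K + 1 - W + (seg.length - 1 - (W - 1 - j)) = K + 1 + j := by omega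
    simp only [e1, e2] at hq
    exact hq
  · intro hP
    apply List.ext_getElem (by simp)
    intro i h1 h2
    rw [List.getElem_reverse, hget, hget]
    by_cases hi : i < W
    · have hq := (hpy (W - 1 - i) (by omega)).mp (hP (W - 1 - i) (by omega))
      have e1 : K - (W - 1 - i) = K + 1 - W + i := by omega
      have e2 : K + 1 + (W - 1 - i) = K + 1 - W + (seg.length - 1 - i) := by omega
      simp only [e1, e2] at hq
      exact hq
    · have hq := (hpy (i - W) (by omega)).mp (hP (i - W) (by omega))
      have e1 : K - (i - W) = K + 1 - W + (seg.length - 1 - i) := by omega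
      have e2 : K + 1 + (i - W) = K + 1 - W + i := by omega
      simp only [e1, e2] at hq
      exact hq.symm

theorem main_eq (rl : Int) (valley : List String) :
    check_reflections rl valley = check_reflections_alt rl valley := by
  simp only [check_reflections, check_reflections_alt]
  split_ifs with hpos
  · rw [crLoop, dif_neg (by omega)]
  · rw [Bool.eq_iff_iff,
      crLoop_iff valley (min (rl + 1) ((valley.length : Int) - rl - 1)).toNat rl (rl + 1) 0
        (by omega),
      palin_iff valley rl (min (rl + 1) ((valley.length : Int) - rl - 1)) rfl (by omega)]

-- ===== VERDICT (by name: the statement is the Claim_ definition above) =====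
theorem check_reflections_spec : Claim_equal_check_reflections := by
  intro rl valley _
  exact main_eq rl valley
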